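-- pv_equiv track=rewrite | github.com/arthurwalnut/EEG_RoboticArm-Control-Demo | sender.py | choose_headset
-- ===== SOURCE A (Python) =====
-- TARGET_HEADSET_ID = None
--
-- def choose_headset(headsets: list[dict]) -> dict:
--     if not headsets:
--         raise RuntimeError("No headset found.")
--
--     if TARGET_HEADSET_ID:
--         for hs in headsets:
--             if hs.get("id") == TARGET_HEADSET_ID:
--                 return hs
--         raise RuntimeError(f"TARGET_HEADSET_ID not found: {TARGET_HEADSET_ID}")
--
--     connected = [h for h in headsets if h.get("status") == "connected"]
--     if connected:
--         return connected[0]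
--
--     discovered = [h for h in headsets if h.get("status") == "discovered"]
--     if discovered:
--         return discovered[0]
--
--     return headsets[0]
-- ===== SOURCE B (Python) =====
-- TARGET_HEADSET_ID = None
--
-- def choose_headset(headsets: list[dict]) -> dict:
--     if not headsets:
--         raise RuntimeError("No headset found.")
--
--     if TARGET_HEADSET_ID:
--         for hs in headsets:
--             if hs.get("id") == TARGET_HEADSET_ID:
--                 return hs
--         raise RuntimeError(f"TARGET_HEADSET_ID not found: {TARGET_HEADSET_ID}")
--
--     def prio(h):
--         s = h.get("status")
--         if s == "connected":
--             return 0
--         if s == "discovered":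
--             return 1
--         return 2
--
--     best = headsets[0]
--     best_p = prio(best)
--     for h in headsets[1:]:
--         p = prio(h)
--         if p < best_p:
--             best, best_p = h, p
--     return best
-- ===== Notes on version B (the rewrite author's own statement) =====
-- stated objective: alternative
-- what changed: Replaces the two filter passes plus fallback with a single priority-selection pass (connected=0, discovered=1, other=2) that keeps the first element of the smallest priority class.
-- outside the precondition, e.g. on choose_headset([]): A raises RuntimeError, B raises RuntimeError
import Mathlib
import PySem

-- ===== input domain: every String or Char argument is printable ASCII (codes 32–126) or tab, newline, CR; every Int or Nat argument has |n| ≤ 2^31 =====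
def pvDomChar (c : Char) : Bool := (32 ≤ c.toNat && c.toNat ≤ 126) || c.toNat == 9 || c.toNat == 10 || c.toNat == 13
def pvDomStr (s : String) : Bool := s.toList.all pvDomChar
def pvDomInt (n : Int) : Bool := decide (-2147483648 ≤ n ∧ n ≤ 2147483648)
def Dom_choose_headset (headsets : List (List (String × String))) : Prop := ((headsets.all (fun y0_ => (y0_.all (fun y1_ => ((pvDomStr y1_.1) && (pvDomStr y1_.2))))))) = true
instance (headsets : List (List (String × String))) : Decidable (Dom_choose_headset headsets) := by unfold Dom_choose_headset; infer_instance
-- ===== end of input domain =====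

-- B selects in ONE pass the first headset of the smallest status-priority class (connected < discovered < other)
-- instead of A's two filter passes plus fallback; same values everywhere A returns (equivalence about return values; A raises on []).

-- dict.get(k): first binding of k in the association list (shared dict-get helper for both ports)
def pvGet (h : List (String × String)) (k : String) : Option String :=
  (h.find? (fun kv => kv.1 == k)).map (·.2)

-- ===== PORT A =====
def TARGET_HEADSET_ID : Option String := none

def choose_headset (headsets : List (List (String × String))) : List (String × String) :=
  if headsets.isEmpty then []   -- Python: raise RuntimeError("No headset found."); excluded by Pre_
  else
    match TARGET_HEADSET_ID with
    | some t =>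
        -- for hs in headsets: return first with id == t; else raise (unreachable: TARGET_HEADSET_ID is None)
        (headsets.find? (fun hs => pvGet hs "id" == some t)).getD []
    | none =>
        let connected := headsets.filter (fun h => pvGet h "status" == some "connected")
        if !connected.isEmpty then connected.headI
        else
          let discovered := headsets.filter (fun h => pvGet h "status" == some "discovered")
          if !discovered.isEmpty then discovered.headI
          else headsets.headI

-- ===== PORT B =====
def pvPrio (h : List (String × String)) : Nat :=
  if pvGet h "status" == some "connected" then 0
  else if pvGet h "status" == some "discovered" then 1
  else 2

def choose_headset_alt (headsets : List (List (String × String))) : List (String × String) :=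
  match headsets with
  | [] => []   -- Python: raise RuntimeError("No headset found."); excluded by Pre_
  | h :: t =>
    match TARGET_HEADSET_ID with
    | some tgt => (headsets.find? (fun hs => pvGet hs "id" == some tgt)).getD []
    | none =>
      (t.foldl (fun acc x => let p := pvPrio x; if p < acc.2 then (x, p) else acc) (h, pvPrio h)).1

-- ===== PRECONDITION & SPEC =====
-- Pre_ excludes only the empty list, on which A raises RuntimeError("No headset found.")
def Pre_choose_headset (headsets : List (List (String × String))) : Prop := headsets ≠ []
instance (headsets : List (List (String × String))) : Decidable (Pre_choose_headset headsets) := by unfold Pre_choose_headset; infer_instance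
def pvWitness_choose_headset : (List (List (String × String))) := [[("status", "discovered")], [("status", "connected")]]

def Spec_choose_headset (headsets : List (List (String × String))) (out : List (String × String)) : Prop := out = choose_headset_alt headsets
instance (headsets : List (List (String × String))) (out : List (String × String)) : Decidable (Spec_choose_headset headsets out) := by unfold Spec_choose_headset; infer_instance

-- ===== CLAIM (what is proved, stated in full; the proofs are below) =====
def Claim_equal_choose_headset : Prop := ∀ (headsets : List (List (String × String))), Dom_choose_headset headsets → Pre_choose_headset headsets → Spec_choose_headset headsets (choose_headset headsets)

-- ===== LEMMAS AND PROOFS =====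

def pvStep (acc : List (String × String) × Nat) (x : List (String × String)) :
    List (String × String) × Nat :=
  let p := pvPrio x; if p < acc.2 then (x, p) else acc

theorem pvAlt_fold (h : List (String × String)) (t : List (List (String × String))) :
    choose_headset_alt (h :: t) = (t.foldl pvStep (h, pvPrio h)).1 := rfl

theorem pvPrio_two (x : List (String × String)) (h0 : pvPrio x ≠ 0) (h1 : pvPrio x ≠ 1) :
    pvPrio x = 2 := by
  unfold pvPrio at *; split_ifs at * <;> simp_all

theorem pvFold0 (t : List (List (String × String))) :
    ∀ best, pvPrio best = 0 → (t.foldl pvStep (best, pvPrio best)).1 = best := by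
  induction t with
  | nil => intro best _; rfl
  | cons x xs ih =>
    intro best h0
    simp only [List.foldl_cons, pvStep, h0]
    have : ¬ pvPrio x < 0 := Nat.not_lt_zero _
    simp only [this, if_false]
    rw [show (best, 0) = (best, pvPrio best) by rw [h0]]
    exact ih best h0

theorem pvFold1 (t : List (List (String × String))) :
    ∀ best, pvPrio best = 1 →
      (t.foldl pvStep (best, pvPrio best)).1 = (t.find? (fun x => pvPrio x == 0)).getD best := by
  induction t with
  | nil => intro best _; rfl
  | cons x xs ih =>
    intro best h1
    simp only [List.foldl_cons, pvStep, h1]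
    by_cases hx : pvPrio x = 0
    · rw [List.find?_cons_of_pos (by simp [hx])]
      simp only [hx, Nat.zero_lt_one, if_pos, Option.getD_some]
      rw [show (x, 0) = (x, pvPrio x) by rw [hx]]
      exact pvFold0 xs x hx
    · rw [List.find?_cons_of_neg (by simp [hx])]
      have hlt : ¬ pvPrio x < 1 := by omega
      simp only [hlt, if_false]
      rw [show (best, 1) = (best, pvPrio best) by rw [h1]]
      exact ih best h1

theorem pvFold2 (t : List (List (String × String))) :
    ∀ best, pvPrio best = 2 →
      (t.foldl pvStep (best, pvPrio best)).1 =
        match t.find? (fun x => pvPrio x == 0) with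
        | some x => x
        | none => (t.find? (fun x => pvPrio x == 1)).getD best := by
  induction t with
  | nil => intro best _; rfl
  | cons x xs ih =>
    intro best h2
    simp only [List.foldl_cons, pvStep, h2]
    by_cases hx0 : pvPrio x = 0
    · rw [List.find?_cons_of_pos (by simp [hx0])]
      have : (0:Nat) < 2 := by omega
      simp only [hx0, this, if_pos]
      rw [show (x, 0) = (x, pvPrio x) by rw [hx0]]
      simpa using pvFold0 xs x hx0
    · rw [List.find?_cons_of_neg (by simp [hx0])]
      by_cases hx1 : pvPrio x = 1
      · rw [List.find?_cons_of_pos (p := fun x => pvPrio x == 1) (by simp [hx1])]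
        have : (1:Nat) < 2 := by omega
        simp only [hx1, this, if_pos]
        rw [show (x, 1) = (x, pvPrio x) by rw [hx1]]
        have hf1 := pvFold1 xs x hx1
        rw [hf1]
        cases hf : xs.find? (fun y => pvPrio y == 0) <;> simp
      · rw [List.find?_cons_of_neg (p := fun x => pvPrio x == 1) (by simp [hx1])]
        have hx2 : pvPrio x = 2 := pvPrio_two x hx0 hx1
        have : ¬ pvPrio x < 2 := by omega
        simp only [this, if_false]
        rw [show (best, 2) = (best, pvPrio best) by rw [h2]]
        exact ih best h2

-- priorities ↔ the filter predicates A uses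
theorem pvPrio_eq_zero (x : List (String × String)) :
    (pvPrio x == 0) = (pvGet x "status" == some "connected") := by
  unfold pvPrio; split_ifs with h1 h2 <;> simp_all

theorem pvPrio_eq_one (x : List (String × String)) :
    (pvPrio x == 1) = (pvGet x "status" == some "discovered") := by
  unfold pvPrio; split_ifs with h1 h2 <;> simp_all

theorem pvPred_zero :
    (fun x => pvPrio x == 0) = (fun x : List (String × String) => pvGet x "status" == some "connected") :=
  funext pvPrio_eq_zero

theorem pvPred_one :
    (fun x => pvPrio x == 1) = (fun x : List (String × String) => pvGet x "status" == some "discovered") :=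
  funext pvPrio_eq_one

theorem pvHeadI_filter {α : Type} [Inhabited α] (p : α → Bool) (l : List α) :
    (l.filter p) ≠ [] → (l.filter p).headI = (l.find? p).getD default := by
  induction l with
  | nil => intro h; simp at h
  | cons x xs ih =>
    intro h
    by_cases hx : p x
    · simp [List.filter_cons, List.find?_cons_of_pos hx, hx]
    · rw [List.find?_cons_of_neg (by simp [hx])]
      simp only [List.filter_cons, hx, if_false, Bool.false_eq_true] at *
      exact ih h

theorem pvFilter_empty_iff {α : Type} (p : α → Bool) (l : List α) :
    l.filter p = [] ↔ l.find? p = none := by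
  rw [List.find?_eq_none, List.filter_eq_nil_iff]

-- ===== VERDICT (by name: the statement is the Claim_ definition above) =====
theorem choose_headset_spec : Claim_equal_choose_headset := by
  intro headsets _ hpre
  unfold Spec_choose_headset
  match headsets with
  | [] => exact absurd rfl hpre
  | h :: t =>
    rw [pvAlt_fold]
    show choose_headset (h :: t) = _
    unfold choose_headset TARGET_HEADSET_ID
    simp only [List.isEmpty_cons, if_false, Bool.false_eq_true]
    by_cases h0 : pvPrio h = 0
    · -- h is connected: A's connected filter starts with h; B's fold keeps h
      have hc : (pvGet h "status" == some "connected") = true := by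
        rw [← pvPrio_eq_zero, h0]; rfl
      simp only [List.filter_cons, hc, if_pos, List.isEmpty_cons, Bool.not_false, if_true,
        List.headI]
      exact (pvFold0 t h h0).symm
    · by_cases h1 : pvPrio h = 1
      · have hnc : (pvGet h "status" == some "connected") = false := by
          rw [← pvPrio_eq_zero]; simp [h1]
        have hd : (pvGet h "status" == some "discovered") = true := by
          rw [← pvPrio_eq_one, h1]; rfl
        have hB := pvFold1 t h h1
        rw [pvPred_zero] at hB
        simp only [List.filter_cons, hnc, Bool.false_eq_true, if_false]
        by_cases hcf : t.filter (fun x => pvGet x "status" == some "connected") = []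
        · have hfn : t.find? (fun x : List (String × String) => pvGet x "status" == some "connected") = none :=
            (pvFilter_empty_iff _ t).mp hcf
          simp only [hcf, List.isEmpty_nil, Bool.not_true, if_false, List.filter_cons, hd,
            if_pos, List.isEmpty_cons, Bool.not_false, if_true, List.headI, Bool.false_eq_true]
          rw [hB, hfn, Option.getD_none]
        · have hne : t.filter (fun x => pvGet x "status" == some "connected") ≠ [] := hcf
          have hie : (t.filter (fun x => pvGet x "status" == some "connected")).isEmpty = false := by
            simpa [List.isEmpty_iff] using hne
          simp only [hie, Bool.not_false, if_true]
          rw [pvHeadI_filter _ _ hne, hB]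
          cases hf : t.find? (fun x : List (String × String) => pvGet x "status" == some "connected") with
          | none => exact absurd ((pvFilter_empty_iff _ t).mpr hf) hne
          | some v => simp
      · have h2 : pvPrio h = 2 := pvPrio_two h h0 h1
        have hnc : (pvGet h "status" == some "connected") = false := by
          rw [← pvPrio_eq_zero]; simp [h2]
        have hnd : (pvGet h "status" == some "discovered") = false := by
          rw [← pvPrio_eq_one]; simp [h2]
        have hB := pvFold2 t h h2
        rw [pvPred_zero, pvPred_one] at hB
        simp only [List.filter_cons, hnc, hnd, Bool.false_eq_true, if_false]
        rw [hB]
        by_cases hcf : t.filter (fun x => pvGet x "status" == some "connected") = []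
        · have hfn : t.find? (fun x : List (String × String) => pvGet x "status" == some "connected") = none :=
            (pvFilter_empty_iff _ t).mp hcf
          simp only [hcf, List.isEmpty_nil, Bool.not_true, if_false, hfn, Bool.false_eq_true]
          by_cases hdf : t.filter (fun x => pvGet x "status" == some "discovered") = []
          · have hfn1 : t.find? (fun x : List (String × String) => pvGet x "status" == some "discovered") = none :=
              (pvFilter_empty_iff _ t).mp hdf
            simp [hdf, hfn1, List.headI]
          · have hie : (t.filter (fun x => pvGet x "status" == some "discovered")).isEmpty = false := by
              simpa [List.isEmpty_iff] using hdf
            simp only [hie, Bool.not_false, if_true]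
            rw [pvHeadI_filter _ _ hdf]
            cases hf : t.find? (fun x : List (String × String) => pvGet x "status" == some "discovered") with
            | none => exact absurd ((pvFilter_empty_iff _ t).mpr hf) hdf
            | some v => simp
        · have hne : t.filter (fun x => pvGet x "status" == some "connected") ≠ [] := hcf
          have hie : (t.filter (fun x => pvGet x "status" == some "connected")).isEmpty = false := by
            simpa [List.isEmpty_iff] using hne
          simp only [hie, Bool.not_false, if_true]
          rw [pvHeadI_filter _ _ hne]
          cases hf : t.find? (fun x : List (String × String) => pvGet x "status" == some "connected") with
          | none => exact absurd ((pvFilter_empty_iff _ t).mpr hf) hne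
          | some v => simp
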